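-- pv_equiv track=rewrite | github.com/Schwafton/Practice-and-Interview-Problems | Practice and Interview Problems/META-all-practice-problems/main.py | maxCandies
-- ===== SOURCE A (Python) =====
-- import math
--
-- def maxCandies(arr, k):
--   # Write your code here
--   candy_eaten = 0
--   minute_counter = 0
--   while minute_counter < k:
--     # set/reset largest to zero
--     largest = 0
--     # find largest number of candies in a bag
--     for each in arr:
--       if each > largest:
--         largest = each
--     # replace largest with floor(largest/2)
--     arr.remove(largest)
--     arr.append(math.floor(largest/2))
--     candy_eaten += largest
--     minute_counter += 1
--   # when minute_counter == k
--   return candy_eaten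
-- ===== SOURCE B (Python) =====
-- def maxCandies(arr, k):
--     # Sort once, then merge-pick: picks are non-increasing, so the halved values
--     # are appended in non-increasing order and the next maximum is always the
--     # front of one of two sorted sequences.  O(n log n + k) instead of O(k*n).
--     # Note: unlike A, this does not mutate arr (equivalence is about the return value).
--     s = sorted(arr, reverse=True)
--     halves = []
--     i = 0
--     j = 0
--     total = 0
--     for _ in range(k):
--         if i < len(s) and (j >= len(halves) or s[i] >= halves[j]):
--             top = s[i]
--             i += 1
--         else:
--             top = halves[j]
--             j += 1
--         halves.append(top // 2)
--         total += top
--     return total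
-- ===== Notes on version B (the rewrite author's own statement) =====
-- stated objective: faster
-- what changed: Replaced the per-minute linear scan+remove+append over the bag list by one descending sort plus a two-queue merge (picks are non-increasing, so the halved values form a second sorted queue and each pick is a head comparison).
import Mathlib
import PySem

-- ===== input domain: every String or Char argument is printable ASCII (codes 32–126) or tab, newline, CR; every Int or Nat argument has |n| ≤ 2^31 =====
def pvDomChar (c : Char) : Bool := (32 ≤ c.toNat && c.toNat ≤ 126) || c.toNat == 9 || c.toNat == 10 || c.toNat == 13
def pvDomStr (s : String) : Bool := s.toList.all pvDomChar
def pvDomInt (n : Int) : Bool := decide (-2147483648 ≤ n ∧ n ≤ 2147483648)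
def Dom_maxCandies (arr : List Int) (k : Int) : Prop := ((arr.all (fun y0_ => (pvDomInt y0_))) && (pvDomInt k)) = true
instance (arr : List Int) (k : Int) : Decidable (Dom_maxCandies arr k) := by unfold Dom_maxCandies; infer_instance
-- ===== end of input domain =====

-- B replaces A's per-minute scan/remove/append by one descending sort plus a two-queue
-- merge (asymptotically faster); A mutates arr in place, B does not — the equivalence
-- proved here is about the return value only.

-- ===== PORT A =====
-- literal port of A's while-loop; the loop runs exactly k times, so fuel = k.toNat.
-- math.floor(largest/2) is exact floor division on |largest| ≤ 2^31, ported as PySem.Int.floordiv.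
-- the 'none' branch of remove? is Python's ValueError (excluded by Pre_).
def maxCandiesLoopA : List Int → Int → Nat → Int
  | _, candy_eaten, 0 => candy_eaten
  | arr, candy_eaten, fuel+1 =>
    let largest := arr.foldl (fun l e => if e > l then e else l) 0
    match PySem.List.remove? arr largest with
    | none => candy_eaten
    | some arr' =>
        maxCandiesLoopA (arr' ++ [PySem.Int.floordiv largest 2]) (candy_eaten + largest) fuel

def maxCandies (arr : List Int) (k : Int) : Int := maxCandiesLoopA arr 0 k.toNat

-- ===== PORT B =====
-- literal port of Source B: the index pointers i/j are modelled by consuming the fronts of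
-- s and of the halves queue; the branch condition is Source B's
-- 'i < len(s) and (j >= len(halves) or s[i] >= halves[j])'.
-- the ([], []) step is Python's IndexError (excluded by Pre_).
def maxCandiesLoopB : List Int → List Int → Int → Nat → Int
  | _, _, total, 0 => total
  | x :: s', [], total, fuel+1 =>
      maxCandiesLoopB s' [PySem.Int.floordiv x 2] (total + x) fuel
  | x :: s', h :: hs, total, fuel+1 =>
      if x ≥ h then
        maxCandiesLoopB s' ((h :: hs) ++ [PySem.Int.floordiv x 2]) (total + x) fuel
      else
        maxCandiesLoopB (x :: s') (hs ++ [PySem.Int.floordiv h 2]) (total + h) fuel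
  | [], h :: hs, total, fuel+1 =>
      maxCandiesLoopB [] (hs ++ [PySem.Int.floordiv h 2]) (total + h) fuel
  | [], [], total, _+1 => total

def maxCandies_alt (arr : List Int) (k : Int) : Int :=
  maxCandiesLoopB (PySem.List.sorted arr (fun x => x) true) [] 0 k.toNat

-- ===== PRECONDITION & SPEC =====
-- Pre_ excludes exactly the inputs where A raises ValueError: k > 0 with no nonnegative
-- element in arr (then largest = 0 is not in arr and arr.remove(0) raises).
def Pre_maxCandies (arr : List Int) (k : Int) : Prop := k ≤ 0 ∨ ∃ x ∈ arr, 0 ≤ x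
instance (arr : List Int) (k : Int) : Decidable (Pre_maxCandies arr k) := by
  unfold Pre_maxCandies; infer_instance

def pvWitness_maxCandies : List Int × Int := ([5, 2], 3)

def Spec_maxCandies (arr : List Int) (k : Int) (out : Int) : Prop := out = maxCandies_alt arr k
instance (arr : List Int) (k : Int) (out : Int) : Decidable (Spec_maxCandies arr k out) := by
  unfold Spec_maxCandies; infer_instance

-- ===== CLAIM (what is proved, stated in full; the proofs are below) =====
def Claim_equal_maxCandies : Prop := ∀ (arr : List Int) (k : Int), Dom_maxCandies arr k → Pre_maxCandies arr k → Spec_maxCandies arr k (maxCandies arr k)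

-- ===== LEMMAS AND PROOFS =====

-- A's inner for-loop step is just max.
theorem foldl_if_eq_max (l : List Int) (a : Int) :
    l.foldl (fun l e => if e > l then e else l) a = l.foldl max a := by
  induction l generalizing a with
  | nil => rfl
  | cons y t ih =>
      simp only [List.foldl_cons]
      have : (if y > a then y else a) = max a y := by
        split <;> omega
      rw [this, ih]

theorem foldl_max_perm {l₁ l₂ : List Int} (h : l₁.Perm l₂) (a : Int) :
    l₁.foldl max a = l₂.foldl max a := by
  induction h generalizing a with
  | nil => rfl
  | cons x _ ih => simp only [List.foldl_cons]; exact ih _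
  | swap x y l =>
      simp only [List.foldl_cons]
      rw [max_assoc, max_comm y x, ← max_assoc]
  | trans _ _ ih₁ ih₂ => exact (ih₁ a).trans (ih₂ a)

-- characterisation of foldl max 0 when a nonnegative maximum element exists
theorem foldl_max_eq_of {l : List Int} {M : Int} (hM : M ∈ l) (hub : ∀ x ∈ l, x ≤ M)
    (h0 : 0 ≤ M) : l.foldl max 0 = M := by
  have h1 := PySem.List.le_foldl_max l 0
  have hle : M ≤ l.foldl max 0 := h1.2 M hM
  rcases PySem.List.foldl_max_mem l 0 with h | h
  · omega
  · have := hub _ h; omega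

-- A's loop depends on arr only through its multiset of elements.
-- A's loop depends on arr only through its multiset of elements.
theorem loopA_perm : ∀ (fuel : Nat) {a₁ a₂ : List Int} (c : Int), a₁.Perm a₂ →
    maxCandiesLoopA a₁ c fuel = maxCandiesLoopA a₂ c fuel := by
  intro fuel
  induction fuel with
  | zero => intro a₁ a₂ c _; rfl
  | succ n ih =>
      intro a₁ a₂ c hp
      simp only [maxCandiesLoopA, foldl_if_eq_max, foldl_max_perm hp]
      set L := a₂.foldl max 0 with hL
      by_cases hmem : L ∈ a₂
      · rw [PySem.List.remove?_eq_some_erase a₁ L (hp.mem_iff.mpr hmem),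
            PySem.List.remove?_eq_some_erase a₂ L hmem]
        exact ih _ ((hp.erase L).append_right _)
      · rw [(PySem.List.remove?_eq_none_iff a₁ L).mpr (fun h => hmem (hp.mem_iff.mp h)),
            (PySem.List.remove?_eq_none_iff a₂ L).mpr hmem]

theorem floordiv_two_le {m g : Int} (h : m ≤ 2 * g + 1) :
    PySem.Int.floordiv m 2 ≤ g := by
  rw [PySem.Int.floordiv_eq_ediv_of_pos (by omega)]; omega

theorem le_two_floordiv_two (m : Int) : m ≤ 2 * PySem.Int.floordiv m 2 + 1 := by
  rw [PySem.Int.floordiv_eq_ediv_of_pos (by omega)]; omega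

theorem floordiv_two_nonneg {m : Int} (h : 0 ≤ m) : 0 ≤ PySem.Int.floordiv m 2 := by
  rw [PySem.Int.floordiv_eq_ediv_of_pos (by omega)]; omega

-- the simulation invariant: both queues sorted non-increasingly; if halves is nonempty,
-- its last element g is ≥ 0 and bounds every element by 2g+1; otherwise some element of s is ≥ 0.
def InvBA (s halves : List Int) : Prop :=
  s.Pairwise (· ≥ ·) ∧ halves.Pairwise (· ≥ ·) ∧
  (match halves.getLast? with
   | none => ∃ x ∈ s, 0 ≤ x
   | some g => 0 ≤ g ∧ ∀ x ∈ s ++ halves, x ≤ 2 * g + 1)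

theorem getLast_le_of_pairwise : ∀ {l : List Int} {g : Int}, l.Pairwise (· ≥ ·) →
    l.getLast? = some g → ∀ y ∈ l, g ≤ y := by
  intro l
  induction l with
  | nil => intro g _ h; simp at h
  | cons a t ih =>
      intro g hp hl y hy
      cases t with
      | nil =>
          simp at hl hy; omega
      | cons b t' =>
          rw [List.getLast?_cons_cons] at hl
          rcases List.mem_cons.mp hy with rfl | hy'
          · have hg := List.mem_of_getLast? hl
            exact (List.pairwise_cons.mp hp).1 g hg
          · exact ih (List.pairwise_cons.mp hp).2 hl y hy'

theorem loopB_eq_loopA : ∀ (fuel : Nat) (s halves : List Int) (total : Int),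
    InvBA s halves →
    maxCandiesLoopB s halves total fuel = maxCandiesLoopA (s ++ halves) total fuel := by
  intro fuel
  induction fuel with
  | zero => intro s halves total _; cases s <;> cases halves <;> rfl
  | succ n ih =>
      intro s halves total hinv
      obtain ⟨hs, hh, hlast⟩ := hinv
      cases s with
      | cons x s' =>
        have hsub : ∀ y ∈ (x :: s' : List Int), y ≤ x := by
          intro y hy
          rcases List.mem_cons.mp hy with rfl | hy'
          · exact le_refl _
          · exact (List.pairwise_cons.mp hs).1 y hy'
        cases halves with
        | nil =>
            -- pick x from s
            simp only [List.getLast?_nil] at hlast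
            obtain ⟨x₀, hx₀m, hx₀⟩ := hlast
            have hx0 : 0 ≤ x := le_trans hx₀ (hsub _ hx₀m)
            have hL : (x :: s').foldl max 0 = x :=
              foldl_max_eq_of List.mem_cons_self hsub hx0
            have hA : maxCandiesLoopA ((x :: s') ++ []) total (n+1)
                = maxCandiesLoopA (s' ++ [PySem.Int.floordiv x 2]) (total + x) n := by
              simp only [maxCandiesLoopA, foldl_if_eq_max, hL, List.append_nil,
                PySem.List.remove?_cons_self]
            have hinv' : InvBA s' [PySem.Int.floordiv x 2] := by
              refine ⟨(List.pairwise_cons.mp hs).2, List.pairwise_singleton _ _, ?_⟩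
              simp only [List.getLast?_singleton]
              refine ⟨floordiv_two_nonneg hx0, ?_⟩
              intro y hy
              have hx21 := le_two_floordiv_two x
              have hf0 := floordiv_two_nonneg hx0
              rcases List.mem_append.mp hy with hy' | hy'
              · have := hsub y (List.mem_cons_of_mem _ hy'); omega
              · simp at hy'; omega
            rw [hA, show maxCandiesLoopB (x :: s') [] total (n+1)
                = maxCandiesLoopB s' [PySem.Int.floordiv x 2] (total + x) n from rfl,
              ih s' [PySem.Int.floordiv x 2] (total + x) hinv']
        | cons h hs' =>
            obtain ⟨g, hg⟩ : ∃ g, (h :: hs').getLast? = some g := by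
              cases e : (h :: hs').getLast? with
              | none => simp [List.getLast?_eq_none_iff] at e
              | some g => exact ⟨g, rfl⟩
            rw [hg] at hlast
            obtain ⟨hg0, hbound⟩ := hlast
            have hgle : ∀ y ∈ (h :: hs' : List Int), g ≤ y := getLast_le_of_pairwise hh hg
            have hhub : ∀ y ∈ (h :: hs' : List Int), y ≤ h := by
              intro y hy
              rcases List.mem_cons.mp hy with rfl | hy'
              · exact le_refl _
              · exact (List.pairwise_cons.mp hh).1 y hy'
            by_cases hxh : x ≥ h
            · -- pick x
              have hub : ∀ y ∈ (x :: s') ++ (h :: hs'), y ≤ x := by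
                intro y hy
                rcases List.mem_append.mp hy with hy' | hy'
                · exact hsub y hy'
                · exact le_trans (hhub y hy') hxh
              have hx0 : 0 ≤ x := le_trans hg0 (le_trans (hgle h List.mem_cons_self) hxh)
              have hL : (x :: (s' ++ h :: hs')).foldl max 0 = x := by
                rw [← List.cons_append]
                exact foldl_max_eq_of (List.mem_append.mpr (Or.inl List.mem_cons_self)) hub hx0
              have hA : maxCandiesLoopA ((x :: s') ++ (h :: hs')) total (n+1)
                  = maxCandiesLoopA ((s' ++ (h :: hs')) ++ [PySem.Int.floordiv x 2]) (total + x) n := by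
                simp only [maxCandiesLoopA, foldl_if_eq_max, List.cons_append, hL,
                  PySem.List.remove?_cons_self]
              have hB : maxCandiesLoopB (x :: s') (h :: hs') total (n+1)
                  = maxCandiesLoopB s' ((h :: hs') ++ [PySem.Int.floordiv x 2]) (total + x) n := by
                simp only [maxCandiesLoopB, if_pos hxh]
              have hinv' : InvBA s' ((h :: hs') ++ [PySem.Int.floordiv x 2]) := by
                refine ⟨(List.pairwise_cons.mp hs).2, ?_, ?_⟩
                · rw [List.pairwise_append]
                  refine ⟨hh, List.pairwise_singleton _ _, ?_⟩
                  intro y hy z hz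
                  simp only [List.mem_singleton] at hz; subst hz
                  exact le_trans (floordiv_two_le (hbound x (List.mem_append.mpr (Or.inl List.mem_cons_self)))) (hgle y hy)
                · rw [List.getLast?_append_of_ne_nil _ (by simp), List.getLast?_singleton]
                  refine ⟨floordiv_two_nonneg hx0, ?_⟩
                  intro y hy
                  have hx21 := le_two_floordiv_two x
                  have hf0 := floordiv_two_nonneg hx0
                  rcases List.mem_append.mp hy with hy' | hy'
                  · have := hsub y (List.mem_cons_of_mem _ hy'); omega
                  · rcases List.mem_append.mp hy' with hy'' | hy''
                    · have := le_trans (hhub y hy'') hxh; omega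
                    · simp only [List.mem_singleton] at hy''; omega
              rw [hB, hA, ih _ _ _ hinv']
              simp [List.append_assoc]
            · -- pick h
              have hxlt : x < h := by omega
              have hub : ∀ y ∈ (x :: s') ++ (h :: hs'), y ≤ h := by
                intro y hy
                rcases List.mem_append.mp hy with hy' | hy'
                · exact le_trans (hsub y hy') (le_of_lt hxlt)
                · exact hhub y hy'
              have hh0 : 0 ≤ h := le_trans hg0 (hgle h List.mem_cons_self)
              have hL : (x :: (s' ++ h :: hs')).foldl max 0 = h := by
                rw [← List.cons_append]
                exact foldl_max_eq_of (List.mem_append.mpr (Or.inr List.mem_cons_self)) hub hh0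
              have hnm : h ∉ s' := by
                intro hm
                exact absurd (hsub h (List.mem_cons_of_mem _ hm)) (by omega)
              have hxe : x ≠ h := by omega
              have hrm : PySem.List.remove? (x :: (s' ++ h :: hs')) h
                  = some (x :: (s' ++ hs')) := by
                rw [PySem.List.remove?_cons_of_ne _ hxe,
                    PySem.List.remove?_eq_some_erase _ h (List.mem_append.mpr (Or.inr List.mem_cons_self)),
                    List.erase_append_right _ hnm, List.erase_cons_head]
                rfl
              have hA : maxCandiesLoopA ((x :: s') ++ (h :: hs')) total (n+1)
                  = maxCandiesLoopA ((x :: (s' ++ hs')) ++ [PySem.Int.floordiv h 2]) (total + h) n := by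
                simp only [maxCandiesLoopA, foldl_if_eq_max, List.cons_append, hL, hrm]
              have hB : maxCandiesLoopB (x :: s') (h :: hs') total (n+1)
                  = maxCandiesLoopB (x :: s') (hs' ++ [PySem.Int.floordiv h 2]) (total + h) n := by
                simp only [maxCandiesLoopB, if_neg hxh]
              have hinv' : InvBA (x :: s') (hs' ++ [PySem.Int.floordiv h 2]) := by
                refine ⟨hs, ?_, ?_⟩
                · rw [List.pairwise_append]
                  refine ⟨(List.pairwise_cons.mp hh).2, List.pairwise_singleton _ _, ?_⟩
                  intro y hy z hz
                  simp only [List.mem_singleton] at hz; subst hz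
                  exact le_trans (floordiv_two_le (hbound h (List.mem_append.mpr (Or.inr List.mem_cons_self)))) (hgle y (List.mem_cons_of_mem _ hy))
                · rw [List.getLast?_append_of_ne_nil _ (by simp), List.getLast?_singleton]
                  refine ⟨floordiv_two_nonneg hh0, ?_⟩
                  intro y hy
                  have hh21 := le_two_floordiv_two h
                  have hf0 := floordiv_two_nonneg hh0
                  rcases List.mem_append.mp hy with hy' | hy'
                  · have := hsub y hy'; omega
                  · rcases List.mem_append.mp hy' with hy'' | hy''
                    · have := hhub y (List.mem_cons_of_mem _ hy''); omega
                    · simp only [List.mem_singleton] at hy''; omega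
              rw [hB, hA, ih _ _ _ hinv']
              simp [List.append_assoc]
      | nil =>
        cases halves with
        | nil =>
            simp only [List.getLast?_nil] at hlast
            obtain ⟨x, hx, _⟩ := hlast
            simp at hx
        | cons h hs' =>
            obtain ⟨g, hg⟩ : ∃ g, (h :: hs').getLast? = some g := by
              cases e : (h :: hs').getLast? with
              | none => simp [List.getLast?_eq_none_iff] at e
              | some g => exact ⟨g, rfl⟩
            rw [hg] at hlast
            obtain ⟨hg0, hbound⟩ := hlast
            have hgle : ∀ y ∈ (h :: hs' : List Int), g ≤ y := getLast_le_of_pairwise hh hg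
            have hhub : ∀ y ∈ (h :: hs' : List Int), y ≤ h := by
              intro y hy
              rcases List.mem_cons.mp hy with rfl | hy'
              · exact le_refl _
              · exact (List.pairwise_cons.mp hh).1 y hy'
            have hh0 : 0 ≤ h := le_trans hg0 (hgle h List.mem_cons_self)
            have hL : (h :: hs').foldl max 0 = h :=
              foldl_max_eq_of List.mem_cons_self hhub hh0
            have hA : maxCandiesLoopA (([] : List Int) ++ (h :: hs')) total (n+1)
                = maxCandiesLoopA (hs' ++ [PySem.Int.floordiv h 2]) (total + h) n := by
              simp only [maxCandiesLoopA, foldl_if_eq_max, hL, List.nil_append,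
                PySem.List.remove?_cons_self]
            have hinv' : InvBA ([] : List Int) (hs' ++ [PySem.Int.floordiv h 2]) := by
              refine ⟨List.Pairwise.nil, ?_, ?_⟩
              · rw [List.pairwise_append]
                refine ⟨(List.pairwise_cons.mp hh).2, List.pairwise_singleton _ _, ?_⟩
                intro y hy z hz
                simp only [List.mem_singleton] at hz; subst hz
                exact le_trans (floordiv_two_le (hbound h (by simp))) (hgle y (List.mem_cons_of_mem _ hy))
              · rw [List.getLast?_append_of_ne_nil _ (by simp), List.getLast?_singleton]
                refine ⟨floordiv_two_nonneg hh0, ?_⟩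
                intro y hy
                have hh21 := le_two_floordiv_two h
                have hf0 := floordiv_two_nonneg hh0
                simp only [List.nil_append] at hy
                rcases List.mem_append.mp hy with hy'' | hy''
                · have := hhub y (List.mem_cons_of_mem _ hy''); omega
                · simp only [List.mem_singleton] at hy''; omega
            rw [show maxCandiesLoopB ([] : List Int) (h :: hs') total (n+1)
                = maxCandiesLoopB [] (hs' ++ [PySem.Int.floordiv h 2]) (total + h) n from rfl,
              hA, ih _ _ _ hinv', List.nil_append]

-- ===== VERDICT (by name: the statement is the Claim_ definition above) =====
theorem maxCandies_spec : Claim_equal_maxCandies := by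
  intro arr k _ hpre
  unfold Spec_maxCandies maxCandies maxCandies_alt
  rcases hpre with hk | ⟨x, hx, hx0⟩
  · rw [Int.toNat_of_nonpos hk]
    cases e : PySem.List.sorted arr (fun x => x) true <;> rfl
  · have hperm := PySem.List.sorted_perm arr (fun x => x) true
    rw [loopB_eq_loopA _ _ _ _ ?_, List.append_nil]
    · exact (loopA_perm _ 0 hperm).symm
    · refine ⟨?_, List.Pairwise.nil, ?_⟩
      · have := PySem.List.sorted_pairwise_rev arr (fun x => x)
        exact this
      · simp only [List.getLast?_nil]
        exact ⟨x, (PySem.List.mem_sorted arr (fun x => x) true x).mpr hx, hx0⟩
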